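-- pv_equiv track=rewrite | github.com/kiran-capoor94/wizard | src/wizard/notion_discovery.py | match_properties
-- ===== SOURCE A (Python) =====
-- _EXACT_NAMES: dict[str, str] = {
--     "task": "task_name",
--     "status": "task_status",
--     "priority": "task_priority",
--     "due date": "task_due_date",
--     "jira": "task_jira_key",
--     "meeting name": "meeting_title",
--     "date": "meeting_date",
--     "krisp url": "meeting_url",
--     "summary": "meeting_summary",
-- }
--
-- _TYPE_HINTS: dict[str, str] = {
--     "task_name": "title",
--     "meeting_title": "title",
--     "task_due_date": "date",
--     "meeting_date": "date",
-- }
--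
-- _SYNONYMS: dict[str, list[str]] = {
--     "task_status": ["state", "workflow", "stage"],
--     "meeting_url": ["recording", "transcript", "krisp", "fathom", "video", "transcript url", "fathom url", "krisp url"],
-- }
--
-- def match_properties(
--     available: dict[str, str],
--     fields: list[str],
-- ) -> dict[str, str | None]:
--     """Map wizard field names to Notion property names using 3-pass matching.
--
--     Returns {wizard_field: matched_property_name_or_None}
--     """
--     result: dict[str, str | None] = {}
--     available_lower = {k.lower(): k for k in available}
--
--     for field in fields:
--         matched = None
--
--         # Pass 1: exact name match (case-insensitive)
--         for prop_lower, prop_original in available_lower.items():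
--             if _EXACT_NAMES.get(prop_lower) == field:
--                 matched = prop_original
--                 break
--
--         # Pass 2: type match
--         if matched is None and field in _TYPE_HINTS:
--             target_type = _TYPE_HINTS[field]
--             for prop_name, prop_type in available.items():
--                 if prop_type == target_type:
--                     matched = prop_name
--                     break
--
--         # Pass 3: synonym match
--         if matched is None and field in _SYNONYMS:
--             synonyms = _SYNONYMS[field]
--             for synonym in synonyms:
--                 if synonym in available_lower:
--                     matched = available_lower[synonym]
--                     break
--
--         result[field] = matched
--
--     return result
-- ===== SOURCE B (Python) =====
-- _EXACT_NAMES: dict[str, str] = {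
--     "task": "task_name",
--     "status": "task_status",
--     "priority": "task_priority",
--     "due date": "task_due_date",
--     "jira": "task_jira_key",
--     "meeting name": "meeting_title",
--     "date": "meeting_date",
--     "krisp url": "meeting_url",
--     "summary": "meeting_summary",
-- }
--
-- _TYPE_HINTS: dict[str, str] = {
--     "task_name": "title",
--     "meeting_title": "title",
--     "task_due_date": "date",
--     "meeting_date": "date",
-- }
--
-- _SYNONYMS: dict[str, list[str]] = {
--     "task_status": ["state", "workflow", "stage"],
--     "meeting_url": ["recording", "transcript", "krisp", "fathom", "video", "transcript url", "fathom url", "krisp url"],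
-- }
--
-- # The only field names that can ever match anything: values of _EXACT_NAMES
-- # (= keys of _TYPE_HINTS and _SYNONYMS are among them).
-- _KNOWN_FIELDS: tuple[str, ...] = (
--     "task_name", "task_status", "task_priority", "task_due_date",
--     "task_jira_key", "meeting_title", "meeting_date", "meeting_url",
--     "meeting_summary",
-- )
--
--
-- def match_properties(
--     available: dict[str, str],
--     fields: list[str],
-- ) -> dict[str, str | None]:
--     """Resolve the fixed set of known fields once into a table, then map
--     each requested field through a single table lookup."""
--     available_lower = {k.lower(): k for k in available}
--
--     # field -> first available prop whose lowered name maps to it in _EXACT_NAMES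
--     exact: dict[str, str] = {}
--     for prop_lower, prop_original in available_lower.items():
--         f = _EXACT_NAMES.get(prop_lower)
--         if f is not None and f not in exact:
--             exact[f] = prop_original
--
--     # type -> first available prop of that type
--     first_by_type: dict[str, str] = {}
--     for prop_name, prop_type in available.items():
--         if prop_type not in first_by_type:
--             first_by_type[prop_type] = prop_name
--
--     def resolve(f: str) -> str | None:
--         m = exact.get(f)
--         if m is None and f in _TYPE_HINTS:
--             m = first_by_type.get(_TYPE_HINTS[f])
--         if m is None:
--             for synonym in _SYNONYMS.get(f, ()):
--                 if synonym in available_lower: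
--                     m = available_lower[synonym]
--                     break
--         return m
--
--     table: dict[str, str | None] = {f: resolve(f) for f in _KNOWN_FIELDS}
--     return {field: table.get(field) for field in fields}
-- ===== Notes on version B (the rewrite author's own statement) =====
-- stated objective: faster
-- what changed: B drops A's per-field scans entirely: it builds O(1) indexes (field->first exact-named prop, type->first prop) in one pass over the properties, resolves the fixed 9-element set of known wizard fields once into a table, and then answers every requested field by a single table lookup.
import Mathlib
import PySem

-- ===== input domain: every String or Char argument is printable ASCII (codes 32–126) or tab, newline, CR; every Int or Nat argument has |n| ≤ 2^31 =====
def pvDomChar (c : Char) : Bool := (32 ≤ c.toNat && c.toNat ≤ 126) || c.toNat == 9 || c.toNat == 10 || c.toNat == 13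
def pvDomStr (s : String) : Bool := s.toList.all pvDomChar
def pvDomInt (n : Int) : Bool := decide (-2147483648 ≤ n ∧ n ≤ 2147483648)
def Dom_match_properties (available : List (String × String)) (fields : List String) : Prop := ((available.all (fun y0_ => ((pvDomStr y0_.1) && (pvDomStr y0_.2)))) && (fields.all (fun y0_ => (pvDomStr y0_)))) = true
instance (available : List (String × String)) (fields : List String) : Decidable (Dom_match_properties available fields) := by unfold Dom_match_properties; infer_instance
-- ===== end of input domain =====

-- B resolves the fixed 9-element set of matchable fields once into a lookup table via O(1) indexes (field→first exact prop, type→first prop), then answers each requested field by one table lookup; return-value equivalence is proved on all inputs.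

-- module constants shared by both ports
def pvExactNames : PySem.Dict String String := PySem.Dict.ofList
  [("task", "task_name"), ("status", "task_status"), ("priority", "task_priority"),
   ("due date", "task_due_date"), ("jira", "task_jira_key"), ("meeting name", "meeting_title"),
   ("date", "meeting_date"), ("krisp url", "meeting_url"), ("summary", "meeting_summary")]

def pvTypeHints : PySem.Dict String String := PySem.Dict.ofList
  [("task_name", "title"), ("meeting_title", "title"),
   ("task_due_date", "date"), ("meeting_date", "date")]

def pvSynonyms : PySem.Dict String (List String) := PySem.Dict.ofList
  [("task_status", ["state", "workflow", "stage"]),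
   ("meeting_url", ["recording", "transcript", "krisp", "fathom", "video", "transcript url", "fathom url", "krisp url"])]

-- B's module constant: the only field names that can ever match (_EXACT_NAMES values)
def pvKnownFields : List String :=
  ["task_name", "task_status", "task_priority", "task_due_date",
   "task_jira_key", "meeting_title", "meeting_date", "meeting_url", "meeting_summary"]

-- ===== PORT A =====
def match_properties (available : List (String × String)) (fields : List String) : List (String × Option String) :=
  -- the dict parameter: its item list (duplicate keys collapse as in a Python dict)
  let avail := PySem.Dict.ofList available
  let availableLower := avail.items.foldl (fun d p => d.insert (PySem.Str.lower p.1) p.1) PySem.Dict.empty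
  (fields.foldl (fun result field =>
      -- Pass 1: exact name match (break at first hit = find?)
      let m1 : Option String :=
        (availableLower.items.find? (fun p => pvExactNames.get? p.1 == some field)).map (·.2)
      -- Pass 2: type match
      let m2 : Option String :=
        match m1 with
        | some m => some m
        | none =>
          match pvTypeHints.get? field with
          | some targetType => (avail.items.find? (fun p => p.2 == targetType)).map (·.1)
          | none => none
      -- Pass 3: synonym match
      let m3 : Option String :=
        match m2 with
        | some m => some m
        | none =>
          match pvSynonyms.get? field with
          | some synonyms =>
            (synonyms.find? (fun s => availableLower.contains s)).bind (fun s => availableLower.get? s)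
          | none => none
      result.insert field m3) (PySem.Dict.empty : PySem.Dict String (Option String))).items

-- ===== PORT B =====
def match_properties_alt (available : List (String × String)) (fields : List String) : List (String × Option String) :=
  let avail := PySem.Dict.ofList available
  let availableLower := avail.items.foldl (fun d p => d.insert (PySem.Str.lower p.1) p.1) PySem.Dict.empty
  -- field -> first available prop whose lowered name maps to it in _EXACT_NAMES
  let exact : PySem.Dict String String := availableLower.items.foldl (fun d p =>
      match pvExactNames.get? p.1 with
      | some f => if d.contains f then d else d.insert f p.2
      | none => d) PySem.Dict.empty
  -- type -> first available prop of that type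
  let firstByType : PySem.Dict String String := avail.items.foldl (fun d p =>
      if d.contains p.2 then d else d.insert p.2 p.1) PySem.Dict.empty
  -- resolve one known field through the indexes (and the synonym list)
  let resolve : String → Option String := fun f =>
    let m1 : Option String := exact.get? f
    let m2 : Option String :=
      match m1 with
      | some m => some m
      | none =>
        match pvTypeHints.get? f with
        | some targetType => firstByType.get? targetType
        | none => none
    match m2 with
    | some m => some m
    | none =>
      match pvSynonyms.get? f with
      | some synonyms =>
        (synonyms.find? (fun s => availableLower.contains s)).bind (fun s => availableLower.get? s)
      | none => none
  -- the full answer table over the fixed known-field set, built once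
  let table : PySem.Dict String (Option String) :=
    pvKnownFields.foldl (fun d f => d.insert f (resolve f)) PySem.Dict.empty
  (fields.foldl (fun result field =>
      result.insert field ((table.get? field).getD none))
    (PySem.Dict.empty : PySem.Dict String (Option String))).items

-- ===== PRECONDITION & SPEC =====
def Spec_match_properties (available : List (String × String)) (fields : List String) (out : List (String × Option String)) : Prop := out = match_properties_alt available fields
instance (available : List (String × String)) (fields : List String) (out : List (String × Option String)) : Decidable (Spec_match_properties available fields out) := by unfold Spec_match_properties; infer_instance

-- ===== CLAIM (what is proved, stated in full; the proofs are below) =====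
def Claim_equal_match_properties : Prop := ∀ (available : List (String × String)) (fields : List String), Dom_match_properties available fields → Spec_match_properties available fields (match_properties available fields)

-- ===== LEMMAS AND PROOFS =====

-- proof-only helpers: the shared indexes and the per-field value of each port
def lowerIdx (available : List (String × String)) : PySem.Dict String String :=
  (PySem.Dict.ofList available).items.foldl (fun d p => d.insert (PySem.Str.lower p.1) p.1) PySem.Dict.empty

def exactIdx (available : List (String × String)) : PySem.Dict String String :=
  (lowerIdx available).items.foldl (fun d p =>
    match pvExactNames.get? p.1 with
    | some f => if d.contains f then d else d.insert f p.2
    | none => d) PySem.Dict.empty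

def typeIdx (available : List (String × String)) : PySem.Dict String String :=
  (PySem.Dict.ofList available).items.foldl (fun d p =>
    if d.contains p.2 then d else d.insert p.2 p.1) PySem.Dict.empty

def pass3 (available : List (String × String)) (field : String) : Option String :=
  match pvSynonyms.get? field with
  | some synonyms =>
    (synonyms.find? (fun s => (lowerIdx available).contains s)).bind (fun s => (lowerIdx available).get? s)
  | none => none

def mA3 (available : List (String × String)) (field : String) : Option String :=
  match (match ((lowerIdx available).items.find? (fun p => pvExactNames.get? p.1 == some field)).map (·.2) with
         | some m => some m
         | none =>
           match pvTypeHints.get? field with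
           | some targetType => ((PySem.Dict.ofList available).items.find? (fun p => p.2 == targetType)).map (·.1)
           | none => none) with
  | some m => some m
  | none => pass3 available field

def resolveB (available : List (String × String)) (field : String) : Option String :=
  match (match (exactIdx available).get? field with
         | some m => some m
         | none =>
           match pvTypeHints.get? field with
           | some targetType => (typeIdx available).get? targetType
           | none => none) with
  | some m => some m
  | none => pass3 available field

def tableB (available : List (String × String)) : PySem.Dict String (Option String) :=
  pvKnownFields.foldl (fun d f => d.insert f (resolveB available f)) PySem.Dict.empty

-- B's `exact` index looked up at `field` is exactly A's pass-1 scan over the same item list.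
theorem exact_fold_get? (l : List (String × String)) (d : PySem.Dict String String) (field : String) :
    (l.foldl (fun d p =>
        match pvExactNames.get? p.1 with
        | some f => if d.contains f then d else d.insert f p.2
        | none => d) d).get? field =
      (match d.get? field with
       | some v => some v
       | none => (l.find? (fun p => pvExactNames.get? p.1 == some field)).map (·.2)) := by
  induction l generalizing d with
  | nil => cases h : d.get? field <;> simp [h]
  | cons p t ih =>
    simp only [List.foldl_cons, List.find?_cons]
    rcases hE : pvExactNames.get? p.1 with _ | f
    · simp [ih]
    · by_cases hf : f = field
      · subst hf
        rcases hc : d.contains f with _ | _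
        · have hg : d.get? f = none := by
            rw [PySem.Dict.get?_eq_none_iff_contains]; exact hc
          simp only [hc, Bool.false_eq_true, if_false, ih,
            PySem.Dict.get?_insert_self, hg]
          simp
        · have hg : ∃ v, d.get? f = some v := by
            have := PySem.Dict.contains_eq_isSome_get? d f
            rw [hc] at this
            exact Option.isSome_iff_exists.mp this.symm
          obtain ⟨v, hv⟩ := hg
          simp [hc, ih, hv]
      · have hbeq : (f == field) = false := by simp [hf]
        have hne : field ≠ f := fun h => hf h.symm
        rcases hc : d.contains f with _ | _
        · simp [hc, ih, PySem.Dict.get?_insert_of_ne d p.2 hne, hbeq]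
        · simp [hc, ih, hbeq]

-- B's `firstByType` index looked up at `t` is exactly A's pass-2 scan over the same item list.
theorem firstByType_fold_get? (l : List (String × String)) (d : PySem.Dict String String) (t : String) :
    (l.foldl (fun d p => if d.contains p.2 then d else d.insert p.2 p.1) d).get? t =
      (match d.get? t with
       | some v => some v
       | none => (l.find? (fun p => p.2 == t)).map (·.1)) := by
  induction l generalizing d with
  | nil => cases h : d.get? t <;> simp [h]
  | cons p t' ih =>
    simp only [List.foldl_cons, List.find?_cons]
    by_cases hf : p.2 = t
    · subst hf
      rcases hc : d.contains p.2 with _ | _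
      · have hg : d.get? p.2 = none := by
          rw [PySem.Dict.get?_eq_none_iff_contains]; exact hc
        simp [ih, hg]
      · have hg : ∃ v, d.get? p.2 = some v := by
          have := PySem.Dict.contains_eq_isSome_get? d p.2
          rw [hc] at this
          exact Option.isSome_iff_exists.mp this.symm
        obtain ⟨v, hv⟩ := hg
        simp [ih, hv]
    · have hbeq : (p.2 == t) = false := by simp [hf]
      have hne : t ≠ p.2 := fun h => hf h.symm
      rcases hc : d.contains p.2 with _ | _
      · simp [ih, PySem.Dict.get?_insert_of_ne d p.1 hne, hbeq]
      · simp [ih, hbeq]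

-- the per-field value of A's three passes equals B's resolver (on ANY field)
theorem mA3_eq_resolveB (available : List (String × String)) (field : String) :
    mA3 available field = resolveB available field := by
  unfold mA3 resolveB
  have h1 := exact_fold_get? (lowerIdx available).items PySem.Dict.empty field
  have h2 := fun t => firstByType_fold_get? (PySem.Dict.ofList available).items PySem.Dict.empty t
  simp only [PySem.Dict.get?_empty] at h1 h2
  rw [show (exactIdx available).get? field = _ from h1]
  rw [show (typeIdx available).get? = _ from funext h2]
  rfl

-- a fold of inserts over keys not containing x leaves get? x unchanged
theorem get?_foldl_insert_of_not_mem {ν : Type} (l : List String) (g : String → ν)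
    (d : PySem.Dict String ν) (x : String) (hx : x ∉ l) :
    (l.foldl (fun d f => d.insert f (g f)) d).get? x = d.get? x := by
  induction l generalizing d with
  | nil => rfl
  | cons a t ih =>
    simp only [List.mem_cons, not_or] at hx
    simp only [List.foldl_cons]
    rw [ih _ hx.2, PySem.Dict.get?_insert_of_ne _ _ hx.1]

-- a fold of inserts over distinct keys: lookup of a member yields its value
theorem get?_foldl_insert_of_mem {ν : Type} (l : List String) (g : String → ν)
    (d : PySem.Dict String ν) (x : String) (hnd : l.Nodup) (hx : x ∈ l) :
    (l.foldl (fun d f => d.insert f (g f)) d).get? x = some (g x) := by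
  induction l generalizing d with
  | nil => cases hx
  | cons a t ih =>
    simp only [List.foldl_cons]
    rcases List.mem_cons.mp hx with h | h
    · subst h
      rw [get?_foldl_insert_of_not_mem _ _ _ _ ((List.nodup_cons.mp hnd).1),
        PySem.Dict.get?_insert_self]
    · exact ih _ (List.nodup_cons.mp hnd).2 h

-- outside the known-field set nothing in _EXACT_NAMES can name `field`
theorem exactNames_ne (field : String) (h : field ∉ pvKnownFields) (x : String) :
    (pvExactNames.get? x == some field) = false := by
  simp only [pvKnownFields, List.mem_cons, not_or] at h
  obtain ⟨h1, h2, h3, h4, h5, h6, h7, h8, h9, -⟩ := h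
  have hmk : pvExactNames = PySem.Dict.mk
      [("task", "task_name"), ("status", "task_status"), ("priority", "task_priority"),
       ("due date", "task_due_date"), ("jira", "task_jira_key"), ("meeting name", "meeting_title"),
       ("date", "meeting_date"), ("krisp url", "meeting_url"), ("summary", "meeting_summary")] := by
    decide
  rw [hmk]
  simp only [PySem.Dict.get?_mk_cons]
  split_ifs <;>
    simp [show (PySem.Dict.mk ([] : List (String × String))).get? x = none from rfl,
      Ne.symm h1, Ne.symm h2, Ne.symm h3, Ne.symm h4, Ne.symm h5,
      Ne.symm h6, Ne.symm h7, Ne.symm h8, Ne.symm h9]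

theorem typeHints_none (field : String) (h : field ∉ pvKnownFields) :
    pvTypeHints.get? field = none := by
  simp only [pvKnownFields, List.mem_cons, not_or] at h
  obtain ⟨h1, h2, h3, h4, h5, h6, h7, h8, h9, -⟩ := h
  have hmk : pvTypeHints = PySem.Dict.mk
      [("task_name", "title"), ("meeting_title", "title"),
       ("task_due_date", "date"), ("meeting_date", "date")] := by decide
  rw [hmk]
  simp only [PySem.Dict.get?_mk_cons]
  split_ifs with a1 a2 a3 a4
  · exact absurd (eq_of_beq a1).symm h1
  · exact absurd (eq_of_beq a2).symm h6
  · exact absurd (eq_of_beq a3).symm h4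
  · exact absurd (eq_of_beq a4).symm h7
  · rfl

theorem synonyms_none (field : String) (h : field ∉ pvKnownFields) :
    pvSynonyms.get? field = none := by
  simp only [pvKnownFields, List.mem_cons, not_or] at h
  obtain ⟨-, h2, -, -, -, -, -, h8, -⟩ := h
  have hmk : pvSynonyms = PySem.Dict.mk
      [("task_status", ["state", "workflow", "stage"]),
       ("meeting_url", ["recording", "transcript", "krisp", "fathom", "video",
                        "transcript url", "fathom url", "krisp url"])] := by decide
  rw [hmk]
  simp only [PySem.Dict.get?_mk_cons]
  split_ifs with a1 a2
  · exact absurd (eq_of_beq a1).symm h2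
  · exact absurd (eq_of_beq a2).symm h8
  · rfl

-- outside the known-field set B's resolver (hence, via mA3_eq_resolveB, A's three passes) yields none
theorem resolveB_of_not_known (available : List (String × String)) (field : String)
    (h : field ∉ pvKnownFields) : resolveB available field = none := by
  unfold resolveB
  have hE : (exactIdx available).get? field = none := by
    unfold exactIdx
    rw [exact_fold_get? _ _ field]
    simp only [PySem.Dict.get?_empty]
    rw [List.find?_eq_none.mpr (fun p _ => by simp [exactNames_ne field h p.1])]
    rfl
  rw [hE, typeHints_none field h]
  unfold pass3
  rw [synonyms_none field h]

-- the per-field value of A equals B's table lookup, for every field string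
theorem mA3_eq_table (available : List (String × String)) (field : String) :
    mA3 available field = ((tableB available).get? field).getD none := by
  by_cases h : field ∈ pvKnownFields
  · unfold tableB
    rw [get?_foldl_insert_of_mem _ _ _ _ (by decide) h]
    exact mA3_eq_resolveB available field
  · unfold tableB
    rw [get?_foldl_insert_of_not_mem _ _ _ _ h, PySem.Dict.get?_empty]
    rw [mA3_eq_resolveB, resolveB_of_not_known available field h]
    rfl

-- ===== VERDICT (by name: the statement is the Claim_ definition above) =====
set_option maxHeartbeats 1000000 in
theorem match_properties_spec : Claim_equal_match_properties := by
  intro available fields _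
  show match_properties available fields = match_properties_alt available fields
  have hA : match_properties available fields =
      (fields.foldl (fun result field => result.insert field (mA3 available field))
        (PySem.Dict.empty : PySem.Dict String (Option String))).items := rfl
  have hB : match_properties_alt available fields =
      (fields.foldl (fun result field =>
          result.insert field (((tableB available).get? field).getD none))
        (PySem.Dict.empty : PySem.Dict String (Option String))).items := rfl
  rw [hA, hB]
  congr 1
  congr 1
  funext result field
  rw [mA3_eq_table]
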